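-- pv_equiv track=rewrite | github.com/rafamdr/coding_chanllenges | equalWithDeletions/main.py | equal_with_deletions
-- ===== SOURCE A (Python) =====
-- def equal_with_deletions(n: str, m: str) -> bool:
--     def process_dels(text: str) -> []:
--         forward, result = 0, []
--         for ch in text:
--             if forward > 0:
--                 forward -= 1
--             elif ch == '%':
--                 forward += 1
--             elif ch == '#':
--                 if len(result) > 0:
--                     result.pop()
--             else:
--                 result += ch
--         return result
--     return process_dels(n) == process_dels(m)
-- ===== SOURCE B (Python) =====
-- def equal_with_deletions(n: str, m: str) -> bool:
--     def unescape(text: str) -> list: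
--         # pass 1: '%' escapes (drops) the immediately following character
--         out, i = [], 0
--         while i < len(text):
--             if text[i] == '%':
--                 i += 2
--             else:
--                 out.append(text[i])
--                 i += 1
--         return out
--
--     def backspace(chars: list) -> list:
--         # pass 2: '#' deletes the previous surviving character (if any)
--         stack = []
--         for ch in chars:
--             if ch == '#':
--                 if stack:
--                     stack.pop()
--             else:
--                 stack.append(ch)
--         return stack
--
--     return backspace(unescape(n)) == backspace(unescape(m))
-- ===== Notes on version B (the rewrite author's own statement) =====
-- stated objective: alternative
-- what changed: Split A's single combined scan with a skip counter into two separate passes: pass 1 resolves '%' escapes by index-jumping (i += 2), pass 2 resolves '#' backspaces with a stack; A interleaves both in one fold over a (counter, result) state.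
import Mathlib
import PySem

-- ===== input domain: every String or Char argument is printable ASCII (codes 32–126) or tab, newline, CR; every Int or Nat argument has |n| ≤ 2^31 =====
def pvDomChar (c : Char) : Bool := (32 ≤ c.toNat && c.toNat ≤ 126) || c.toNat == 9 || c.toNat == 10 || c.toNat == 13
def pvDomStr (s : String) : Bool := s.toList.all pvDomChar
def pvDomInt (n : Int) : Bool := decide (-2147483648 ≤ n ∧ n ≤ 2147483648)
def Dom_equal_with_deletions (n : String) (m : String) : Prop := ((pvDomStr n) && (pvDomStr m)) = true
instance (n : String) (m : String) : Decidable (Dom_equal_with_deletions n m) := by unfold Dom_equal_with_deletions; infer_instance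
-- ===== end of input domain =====

-- B splits A's single combined scan into two passes (escape resolution, then backspace resolution); alternative decomposition, same cost.


-- ===== PORT A =====
-- one step of A's loop over state (forward, result); result.pop() removes the last element = dropLast (guarded by len > 0)
def pvStepA (st : Int × List Char) (ch : Char) : Int × List Char :=
  if st.1 > 0 then (st.1 - 1, st.2)
  else if ch = '%' then (st.1 + 1, st.2)
  else if ch = '#' then (st.1, if st.2.length > 0 then st.2.dropLast else st.2)
  else (st.1, st.2 ++ [ch])

def pvProcessDels (text : String) : List Char :=
  (text.toList.foldl pvStepA (0, [])).2

def equal_with_deletions (n : String) (m : String) : Bool :=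
  pvProcessDels n == pvProcessDels m

-- ===== PORT B =====
-- pass 1: '%' escapes (drops) the immediately following character (Source B's i += 2)
def pvUnescape : List Char → List Char
  | [] => []
  | '%' :: _ :: rest => pvUnescape rest
  | '%' :: [] => []
  | c :: rest => c :: pvUnescape rest

-- pass 2: '#' deletes the previous surviving character (if any); stack.pop() removes the last element
def pvBackStep (stack : List Char) (ch : Char) : List Char :=
  if ch = '#' then (if stack ≠ [] then stack.dropLast else stack)
  else stack ++ [ch]

def pvBackspace (chars : List Char) : List Char :=
  chars.foldl pvBackStep []

def equal_with_deletions_alt (n : String) (m : String) : Bool :=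
  pvBackspace (pvUnescape n.toList) == pvBackspace (pvUnescape m.toList)

-- ===== PRECONDITION & SPEC =====
def Spec_equal_with_deletions (n : String) (m : String) (out : Bool) : Prop := out = equal_with_deletions_alt n m
instance (n : String) (m : String) (out : Bool) : Decidable (Spec_equal_with_deletions n m out) := by unfold Spec_equal_with_deletions; infer_instance

-- ===== CLAIM (what is proved, stated in full; the proofs are below) =====
def Claim_equal_equal_with_deletions : Prop := ∀ (n : String) (m : String), Dom_equal_with_deletions n m → Spec_equal_with_deletions n m (equal_with_deletions n m)

-- ===== LEMMAS AND PROOFS =====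

theorem pvMain (l : List Char) : ∀ r : List Char,
    (l.foldl pvStepA (0, r)).2 = (pvUnescape l).foldl pvBackStep r := by
  induction l using pvUnescape.induct with
  | case1 => intro r; simp [pvUnescape]
  | case2 c rest ih =>
      intro r
      simp only [List.foldl, pvUnescape]
      have h1 : pvStepA (0, r) '%' = (1, r) := by simp [pvStepA]
      have h2 : pvStepA (1, r) c = (0, r) := by simp [pvStepA]
      rw [h1, h2, ih]
  | case3 =>
      intro r; simp [pvUnescape, pvStepA, List.foldl]
  | case4 c rest h1 h2 ih =>
      intro r
      have hc : c ≠ '%' := by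
        intro h
        cases rest with
        | nil => exact h2 h rfl
        | cons d tl => exact h1 d tl h rfl
      simp only [List.foldl]
      have hun : pvUnescape (c :: rest) = c :: pvUnescape rest := by
        cases rest <;> simp [pvUnescape]
      rw [hun]
      simp only [List.foldl]
      by_cases hh : c = '#'
      · subst hh
        have hA : pvStepA (0, r) '#' = (0, if r.length > 0 then r.dropLast else r) := by
          simp [pvStepA]
        rw [hA, ih]
        congr 1
        simp [pvBackStep]
        rcases r with _ | _ <;> simp
      · have hA : pvStepA (0, r) c = (0, r ++ [c]) := by
          simp [pvStepA, hc, hh]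
        rw [hA, ih]
        congr 1
        simp [pvBackStep, hh]

theorem pvProcessEq (s : String) : pvProcessDels s = pvBackspace (pvUnescape s.toList) := by
  simpa [pvProcessDels, pvBackspace] using pvMain s.toList []

-- ===== VERDICT (by name: the statement is the Claim_ definition above) =====
theorem equal_with_deletions_spec : Claim_equal_equal_with_deletions := by
  intro n m _
  unfold Spec_equal_with_deletions equal_with_deletions equal_with_deletions_alt
  rw [pvProcessEq, pvProcessEq]
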